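-- pv_equiv track=rewrite | github.com/dunishaaa/cs-animations | erathostenes-sieve/main_scene.py | normalPrime
-- ===== SOURCE A (Python) =====
-- def normalPrime(n: int):
--     l = [True for i in range(n + 1)]
--     l[1] = False
--
--     for i in range(1, n + 1):
--         for j in range(2, i):
--             if i == 1 or i % j == 0:
--                 l[i] = False
--                 break
--     return l
-- ===== SOURCE B (Python) =====
-- def normalPrime(n: int):
--     l = [True] * (n + 1)
--     l[1] = False
--     for i in range(2, n + 1):
--         for j in range(2 * i, n + 1, i):
--             l[j] = False
--     return l
-- ===== Notes on version B (the rewrite author's own statement) =====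
-- stated objective: faster
-- what changed: A trial-divides every index by all smaller candidates in a nested double scan; B is a sieve that crosses out the proper multiples of each index, so total work is the harmonic sum over the indices instead of quadratic.
import Mathlib
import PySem

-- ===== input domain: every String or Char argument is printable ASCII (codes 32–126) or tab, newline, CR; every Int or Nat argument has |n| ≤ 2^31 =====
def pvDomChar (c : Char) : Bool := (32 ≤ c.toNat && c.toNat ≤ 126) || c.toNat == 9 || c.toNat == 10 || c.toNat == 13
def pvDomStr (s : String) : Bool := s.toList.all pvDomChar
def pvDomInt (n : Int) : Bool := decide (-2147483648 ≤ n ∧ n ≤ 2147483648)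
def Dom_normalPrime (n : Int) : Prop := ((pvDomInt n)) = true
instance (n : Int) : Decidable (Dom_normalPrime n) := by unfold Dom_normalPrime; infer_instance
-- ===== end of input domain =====

-- B replaces A's O(n^2) nested trial division by a sieve that crosses out the proper
-- multiples of every index (O(n log n) total work).

-- ===== PORT A =====
-- inner loop over j in range(2, i): if i == 1 or i % j == 0: l[i] = False; break
-- (i ranges over range(1, n+1), so i ≥ 1 and i.toNat is exact)
def npInner (i : Int) (l : List Bool) : List Int → List Bool
  | [] => l
  | j :: js => if i == 1 || PySem.Int.mod i j == 0 then l.set i.toNat false else npInner i l js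

def normalPrime (n : Int) : List Bool :=
  let l := (PySem.List.pyRange 0 (n+1) 1).map (fun _ => true)
  let l := l.set 1 false
  (PySem.List.pyRange 1 (n+1) 1).foldl (fun l i => npInner i l (PySem.List.pyRange 2 i 1)) l

-- ===== PORT B =====
-- [True] * (n + 1) is List.replicate (n+1).toNat true (Python repeats max(0, n+1) times);
-- the nested for-loops become nested foldl over the same ranges, l[j] = False is List.set
-- (j = m*i with m ≥ 2 so j ≥ 0 and j.toNat is exact).
def normalPrime_alt (n : Int) : List Bool :=
  let l := (List.replicate (n + 1).toNat true).set 1 false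
  (PySem.List.pyRange 2 (n+1) 1).foldl
    (fun l i => (PySem.List.pyRange (2*i) (n+1) i).foldl (fun l j => l.set j.toNat false) l) l

-- ===== PRECONDITION & SPEC =====
-- Python A assigns False into the second list cell, an IndexError unless n is positive.
def Pre_normalPrime (n : Int) : Prop := 1 ≤ n
instance (n : Int) : Decidable (Pre_normalPrime n) := by unfold Pre_normalPrime; infer_instance
def pvWitness_normalPrime : Int := 10

def Spec_normalPrime (n : Int) (out : List Bool) : Prop := out = normalPrime_alt n
instance (n : Int) (out : List Bool) : Decidable (Spec_normalPrime n out) := by unfold Spec_normalPrime; infer_instance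

-- ===== CLAIM (what is proved, stated in full; the proofs are below) =====
def Claim_equal_normalPrime : Prop := ∀ (n : Int), Dom_normalPrime n → Pre_normalPrime n → Spec_normalPrime n (normalPrime n)

-- ===== LEMMAS AND PROOFS =====

-- A's inner loop triggers exactly when some j in range(2, i) divides i (or i = 1).
def condA (i : Int) : Bool :=
  (PySem.List.pyRange 2 i 1).any (fun j => i == 1 || PySem.Int.mod i j == 0)

lemma npInner_eq (i : Int) (l : List Bool) (js : List Int) :
    npInner i l js =
      if js.any (fun j => i == 1 || PySem.Int.mod i j == 0) then l.set i.toNat false else l := by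
  induction js with
  | nil => simp [npInner]
  | cons j js ih =>
    simp only [npInner, List.any_cons]
    by_cases h : (i == 1 || PySem.Int.mod i j == 0) = true
    · simp [h]
    · simp [h, ih]

-- a fold of conditional 'set false' operations, read back pointwise
lemma foldl_set_getElem? (C : Int → Bool) (is : List Int) (l : List Bool) (k : Nat) :
    (is.foldl (fun l i => if C i then l.set i.toNat false else l) l)[k]? =
      if is.any (fun i => i.toNat == k && C i) then (if k < l.length then some false else none)
      else l[k]? := by
  induction is generalizing l with
  | nil => simp
  | cons i is ih =>
    simp only [List.foldl_cons, List.any_cons]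
    rw [ih]
    by_cases hC : C i = true
    · by_cases hk : i.toNat = k
      · subst hk
        by_cases hr : is.any (fun i' => i'.toNat == i.toNat && C i') = true <;>
          simp [hC, hr, List.getElem?_set]
      · have hbka : (i.toNat == k) = false := by simp [hk]
        simp only [hC, if_true, hbka, Bool.false_and, Bool.false_or]
        rw [List.getElem?_set_ne hk, List.length_set]
    · have hC' : C i = false := by simp at hC; exact hC
      simp [hC']

lemma condA_iff (k : Int) (hk : 2 ≤ k) :
    condA k = true ↔ ∃ j : Int, 2 ≤ j ∧ j < k ∧ PySem.Int.mod k j = 0 := by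
  unfold condA
  rw [List.any_eq_true]
  constructor
  · rintro ⟨j, hj, hcond⟩
    rw [PySem.List.mem_pyRange_one] at hj
    have h1 : (k == 1) = false := by simp; omega
    rw [h1] at hcond
    simp at hcond
    exact ⟨j, hj.1, hj.2, hcond⟩
  · rintro ⟨j, h2j, hjk, hmod⟩
    refine ⟨j, ?_, ?_⟩
    · rw [PySem.List.mem_pyRange_one]; exact ⟨h2j, hjk⟩
    · simp [hmod]

lemma range_getElem? (n m : Nat) : (List.range n)[m]? = if m < n then some m else none := by
  rcases lt_or_ge m n with h | h
  · simp [h]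
  · rw [List.getElem?_eq_none (by simpa using h)]
    simp; omega

-- A's result, pointwise
lemma a_getElem? (n : Int) (hn : 1 ≤ n) (k : Nat) :
    (normalPrime n)[k]? =
      if k < (n+1).toNat then
        some (if k = 0 then true else if k = 1 then false else !condA (k:Int))
      else none := by
  unfold normalPrime
  simp only
  have hbody : (fun (l : List Bool) (i : Int) => npInner i l (PySem.List.pyRange 2 i 1)) =
      (fun l i => if condA i then l.set i.toNat false else l) := by
    funext l i; rw [npInner_eq]; rfl
  rw [hbody, foldl_set_getElem? condA]
  have hL : (((PySem.List.pyRange 0 (n+1) 1).map (fun _ => true)).set 1 false).length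
      = (n+1).toNat := by
    simp [PySem.List.length_pyRange_one]
  have hbase : (((PySem.List.pyRange 0 (n+1) 1).map (fun _ => true)).set 1 false)[k]? =
      if k < (n+1).toNat then some (if k = 1 then false else true) else none := by
    rw [PySem.List.pyRange_one]
    by_cases hk1 : k = 1
    · subst hk1
      simp [List.getElem?_set]
    · rw [List.getElem?_set_ne (by omega)]
      simp only [List.getElem?_map, range_getElem?, Int.sub_zero]
      rcases lt_or_ge k ((n+1).toNat) with h | h <;> simp [h, hk1]
  have houter : ((PySem.List.pyRange 1 (n+1) 1).any (fun i => i.toNat == k && condA i)) =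
      (decide (1 ≤ (k:Int) ∧ (k:Int) < n + 1) && condA (k:Int)) := by
    cases h : ((PySem.List.pyRange 1 (n+1) 1).any (fun i => i.toNat == k && condA i)) with
    | true =>
      rw [List.any_eq_true] at h
      obtain ⟨i, hmem, hcond⟩ := h
      rw [PySem.List.mem_pyRange_one] at hmem
      simp only [Bool.and_eq_true, beq_iff_eq] at hcond
      have hik : i = (k:Int) := by omega
      subst hik
      symm
      simp only [Bool.and_eq_true, decide_eq_true_iff]
      exact ⟨⟨hmem.1, hmem.2⟩, hcond.2⟩
    | false =>
      rw [List.any_eq_false] at h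
      symm
      by_contra hx
      simp only [← ne_eq] at hx
      rw [Bool.ne_false_iff, Bool.and_eq_true, decide_eq_true_iff] at hx
      obtain ⟨⟨h1, h2⟩, h3⟩ := hx
      have hmem : (k:Int) ∈ PySem.List.pyRange 1 (n+1) 1 := by
        rw [PySem.List.mem_pyRange_one]; exact ⟨h1, h2⟩
      have := h _ hmem
      simp [h3] at this
  rw [houter, hL, hbase]
  rcases lt_or_ge k ((n+1).toNat) with h | h
  · simp only [h, if_true]
    by_cases hk0 : k = 0
    · subst hk0; simp
    · by_cases hk1 : k = 1
      · subst hk1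
        have hc1 : condA (1:Int) = false := by
          unfold condA
          rw [PySem.List.pyRange_one_eq_nil (by omega)]
          rfl
        simp [hc1]
      · have h1k : 1 ≤ (k:Int) := by omega
        have hkn : (k:Int) < n + 1 := by omega
        have : decide (1 ≤ (k:Int) ∧ (k:Int) < n + 1) = true := by simp [h1k, hkn]
        rw [this]
        simp only [Bool.true_and, hk0, hk1, if_false]
        cases hc : condA (k:Int) <;> simp
  · have hk' : ¬ k < (n+1).toNat := by omega
    simp [hk']

-- nested fold over ranges = fold over the flattened list of marked indices
lemma foldl_foldl_flatMap {α β : Type} (f : α → β → α) (g : Int → List β)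
    (is : List Int) (l : α) :
    is.foldl (fun l i => (g i).foldl f l) l = (is.flatMap g).foldl f l := by
  induction is generalizing l with
  | nil => simp
  | cons i is ih => simp [List.foldl_append, ih]

-- B's result, pointwise (same characterisation as A's)
lemma b_getElem? (n : Int) (hn : 1 ≤ n) (k : Nat) :
    (normalPrime_alt n)[k]? =
      if k < (n+1).toNat then
        some (if k = 0 then true else if k = 1 then false else !condA (k:Int))
      else none := by
  unfold normalPrime_alt
  simp only
  rw [foldl_foldl_flatMap]
  have hcond := foldl_set_getElem? (fun _ => true)
    ((PySem.List.pyRange 2 (n+1) 1).flatMap (fun i => PySem.List.pyRange (2*i) (n+1) i))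
    ((List.replicate (n + 1).toNat true).set 1 false) k
  rw [show (fun (l : List Bool) (j : Int) => l.set j.toNat false) =
      (fun l j => if (fun (_ : Int) => true) j then l.set j.toNat false else l) from rfl]
  rw [hcond]
  simp only [Bool.and_true]
  have hL : ((List.replicate (n + 1).toNat true).set 1 false).length = (n+1).toNat := by simp
  have hbase : ((List.replicate (n + 1).toNat true).set 1 false)[k]? =
      if k < (n+1).toNat then some (if k = 1 then false else true) else none := by
    by_cases hk1 : k = 1
    · subst hk1
      by_cases h : 1 < (n+1).toNat
      · simp [h]
      · rw [List.getElem?_eq_none (by simpa using by omega)]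
        simp; omega
    · rw [List.getElem?_set_ne (by omega)]
      rcases lt_or_ge k ((n+1).toNat) with h | h
      · simp [h, hk1]
      · rw [List.getElem?_eq_none (by simpa using h)]
        simp; omega
  -- the sieve marks index k iff 2 ≤ k ≤ n and k has a divisor in [2, k)
  have hmark : (((PySem.List.pyRange 2 (n+1) 1).flatMap
        (fun i => PySem.List.pyRange (2*i) (n+1) i)).any (fun j => j.toNat == k)) =
      (decide (2 ≤ (k:Int) ∧ (k:Int) < n + 1) && condA (k:Int)) := by
    cases h : (((PySem.List.pyRange 2 (n+1) 1).flatMap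
        (fun i => PySem.List.pyRange (2*i) (n+1) i)).any (fun j => j.toNat == k)) with
    | true =>
      rw [List.any_eq_true] at h
      obtain ⟨j, hmem, hjk⟩ := h
      rw [List.mem_flatMap] at hmem
      obtain ⟨i, hi, hj⟩ := hmem
      rw [PySem.List.mem_pyRange_one] at hi
      rw [PySem.List.mem_pyRange_iff_of_pos (by omega)] at hj
      obtain ⟨hj1, hj2, hj3⟩ := hj
      have hjk0 : j.toNat = k := by simpa using hjk
      have hjpos : 0 < j := by omega
      have hjk' : j = (k:Int) := by omega
      subst hjk'
      have hdvd : i ∣ ((k:Int)) := by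
        obtain ⟨c, hc⟩ := hj3
        exact ⟨2 + c, by linear_combination hc⟩
      symm
      simp only [Bool.and_eq_true, decide_eq_true_iff]
      refine ⟨⟨by omega, hj2⟩, ?_⟩
      rw [condA_iff (k:Int) (by omega)]
      exact ⟨i, hi.1, by omega, (PySem.Int.mod_eq_zero_iff_dvd (k:Int) i).mpr hdvd⟩
    | false =>
      rw [List.any_eq_false] at h
      symm
      by_contra hx
      simp only [← ne_eq] at hx
      rw [Bool.ne_false_iff, Bool.and_eq_true, decide_eq_true_iff] at hx
      obtain ⟨⟨h2k, hkn⟩, hc⟩ := hx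
      rw [condA_iff (k:Int) h2k] at hc
      obtain ⟨d, hd2, hdk, hdm⟩ := hc
      have hdvd : d ∣ (k:Int) := (PySem.Int.mod_eq_zero_iff_dvd (k:Int) d).mp hdm
      obtain ⟨m, hm⟩ := hdvd
      have hm2 : 2 ≤ m := by nlinarith
      have hmem : (k:Int) ∈ (PySem.List.pyRange 2 (n+1) 1).flatMap
          (fun i => PySem.List.pyRange (2*i) (n+1) i) := by
        rw [List.mem_flatMap]
        refine ⟨d, ?_, ?_⟩
        · rw [PySem.List.mem_pyRange_one]; exact ⟨hd2, by omega⟩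
        · rw [PySem.List.mem_pyRange_iff_of_pos (by omega)]
          refine ⟨by nlinarith, hkn, ⟨m - 2, by rw [hm]; ring⟩⟩
      have := h _ hmem
      simp at this
  rw [hmark, hL, hbase]
  rcases lt_or_ge k ((n+1).toNat) with h | h
  · simp only [h, if_true]
    by_cases hk0 : k = 0
    · subst hk0; simp
    · by_cases hk1 : k = 1
      · subst hk1; simp
      · have h2k : (2:Int) ≤ (k:Int) := by omega
        have hkn : (k:Int) < n + 1 := by omega
        have : decide (2 ≤ (k:Int) ∧ (k:Int) < n + 1) = true := by simp [h2k, hkn]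
        rw [this]
        simp only [Bool.true_and, hk0, hk1, if_false]
        cases hc : condA (k:Int) <;> simp
  · have hk' : ¬ k < (n+1).toNat := by omega
    simp [hk']

-- ===== VERDICT (by name: the statement is the Claim_ definition above) =====
theorem normalPrime_spec : Claim_equal_normalPrime := by
  intro n hdom hpre
  unfold Spec_normalPrime
  apply List.ext_getElem?
  intro k
  rw [a_getElem? n hpre k, b_getElem? n hpre k]
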